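-- pv_equiv track=rewrite | github.com/HyunSung-Na/TIL-algorism | 알고리즘/예산.py | mid_value
-- ===== SOURCE A (Python) =====
-- def mid_value(budgets, mid):
--     stack_min = []
--     stack_max = []
--     for budget in budgets:
--         if budget <= mid:
--             stack_min.append(budget)
--         else:
--             stack_max.append(budget)
--     min = sum(stack_min)
--     max = sum(stack_max)
--     return [min,max,len(stack_max)]
-- ===== SOURCE B (Python) =====
-- def mid_value(budgets, mid):
--     # Sort first, then find the split point with a scan: everything before
--     # the split is <= mid, everything after is > mid (correct by sortedness).
--     s = sorted(budgets)
--     k = 0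
--     while k < len(s) and s[k] <= mid:
--         k += 1
--     return [sum(s[:k]), sum(s[k:]), len(s) - k]
-- ===== Notes on version B (the rewrite author's own statement) =====
-- stated objective: alternative
-- what changed: Replaced A's one-pass partition into two lists with a sort-then-split algorithm: sort the budgets, scan for the first element above the threshold, and return the sums of the two slices and the upper slice's length (correct because integer sums are order-independent and sorting is a permutation).
import Mathlib
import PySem

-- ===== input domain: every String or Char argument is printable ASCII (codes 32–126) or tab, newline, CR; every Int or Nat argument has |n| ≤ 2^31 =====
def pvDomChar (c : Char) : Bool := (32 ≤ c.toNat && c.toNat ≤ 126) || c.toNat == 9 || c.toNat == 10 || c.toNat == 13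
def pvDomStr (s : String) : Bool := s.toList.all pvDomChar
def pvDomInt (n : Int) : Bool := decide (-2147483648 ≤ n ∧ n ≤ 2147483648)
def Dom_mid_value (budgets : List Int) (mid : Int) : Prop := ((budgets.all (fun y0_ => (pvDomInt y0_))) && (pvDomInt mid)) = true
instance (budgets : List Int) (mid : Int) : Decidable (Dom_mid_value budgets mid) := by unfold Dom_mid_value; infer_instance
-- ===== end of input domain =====

-- B replaces A's one-pass two-list partition by sort-then-split (alternative algorithm, same results).

-- ===== PORT A =====
def mid_value (budgets : List Int) (mid : Int) : List Int :=
  let st := budgets.foldl (fun (st : List Int × List Int) budget =>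
    if budget ≤ mid then (st.1 ++ [budget], st.2) else (st.1, st.2 ++ [budget])) ([], [])
  let min := st.1.foldl (· + ·) 0
  let max := st.2.foldl (· + ·) 0
  [min, max, (st.2.length : Int)]

-- ===== PORT B =====
-- the `while k < len(s) and s[k] <= mid: k += 1` scan: k counts the leading run of elements ≤ mid
def scanK : List Int → Int → Nat
  | [], _ => 0
  | x :: xs, mid => if x ≤ mid then scanK xs mid + 1 else 0

def mid_value_alt (budgets : List Int) (mid : Int) : List Int :=
  let s := PySem.List.sorted budgets (fun x => x) false
  let k := scanK s mid
  -- s[:k] / s[k:] with 0 ≤ k ≤ len(s) are exactly take/drop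
  [(s.take k).foldl (· + ·) 0, (s.drop k).foldl (· + ·) 0, (s.length : Int) - (k : Int)]

-- ===== PRECONDITION & SPEC =====
def Spec_mid_value (budgets : List Int) (mid : Int) (out : List Int) : Prop := out = mid_value_alt budgets mid
instance (budgets : List Int) (mid : Int) (out : List Int) : Decidable (Spec_mid_value budgets mid out) := by unfold Spec_mid_value; infer_instance

-- ===== CLAIM =====
def Claim_equal_mid_value : Prop := ∀ (budgets : List Int) (mid : Int), Dom_mid_value budgets mid → Spec_mid_value budgets mid (mid_value budgets mid)

-- ===== LEMMAS AND PROOFS =====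

lemma mv_loop (budgets : List Int) (mid : Int) (a b : List Int) :
    budgets.foldl (fun (st : List Int × List Int) budget =>
      if budget ≤ mid then (st.1 ++ [budget], st.2) else (st.1, st.2 ++ [budget])) (a, b)
    = (a ++ (budgets.filter (fun x => x ≤ mid)),
       b ++ (budgets.filter (fun x => ¬ x ≤ mid))) := by
  induction budgets generalizing a b with
  | nil => simp
  | cons x xs ih =>
    by_cases h : x ≤ mid <;> simp [h, ih, List.filter_cons]

lemma foldl_add_init (l : List Int) (s : Int) :
    l.foldl (· + ·) s = s + l.foldl (· + ·) 0 := by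
  induction l generalizing s with
  | nil => simp
  | cons y ys ih => simp only [List.foldl_cons]; rw [ih, ih (0 + y)]; ring

lemma foldl0_eq_sum (l : List Int) : l.foldl (· + ·) 0 = l.sum := by
  induction l with
  | nil => simp
  | cons y ys ih => simp only [List.foldl_cons, List.sum_cons]; rw [foldl_add_init, ih]; ring

lemma take_scanK (s : List Int) (mid : Int) :
    s.take (scanK s mid) = s.takeWhile (fun x => decide (x ≤ mid)) := by
  induction s with
  | nil => rfl
  | cons x xs ih =>
    by_cases h : x ≤ mid <;> simp [scanK, h, ih]

lemma drop_scanK (s : List Int) (mid : Int) :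
    s.drop (scanK s mid) = s.dropWhile (fun x => decide (x ≤ mid)) := by
  induction s with
  | nil => rfl
  | cons x xs ih =>
    by_cases h : x ≤ mid <;> simp [scanK, h, ih]

lemma takeWhile_eq_filter_of_sorted (s : List Int) (mid : Int)
    (hs : s.Pairwise (· ≤ ·)) :
    s.takeWhile (fun x => decide (x ≤ mid)) = s.filter (fun x => decide (x ≤ mid)) := by
  induction s with
  | nil => rfl
  | cons x xs ih =>
    rcases List.pairwise_cons.mp hs with ⟨hx, hxs⟩
    by_cases h : x ≤ mid
    · simp [h, ih hxs]
    · have hnone : ∀ y ∈ xs, ¬ y ≤ mid := fun y hy hle => h (le_trans (hx y hy) hle)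
      simp only [List.takeWhile_cons, List.filter_cons, h, decide_false]
      simp only [Bool.false_eq_true, if_false]
      symm
      rw [List.filter_eq_nil_iff]
      intro y hy
      simp [hnone y hy]

lemma dropWhile_eq_filter_of_sorted (s : List Int) (mid : Int)
    (hs : s.Pairwise (· ≤ ·)) :
    s.dropWhile (fun x => decide (x ≤ mid)) = s.filter (fun x => decide (¬ x ≤ mid)) := by
  induction s with
  | nil => rfl
  | cons x xs ih =>
    rcases List.pairwise_cons.mp hs with ⟨hx, hxs⟩
    by_cases h : x ≤ mid
    · simp [h, ih hxs]
    · have hall : ∀ y ∈ xs, ¬ y ≤ mid := fun y hy hle => h (le_trans (hx y hy) hle)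
      have h' : mid < x := not_le.mp h
      have hself : xs.filter (fun y => decide (mid < y)) = xs := by
        rw [List.filter_eq_self]
        intro y hy
        simp [not_le.mp (hall y hy)]
      simp [h, h', hself]

lemma scanK_le (s : List Int) (mid : Int) : scanK s mid ≤ s.length := by
  induction s with
  | nil => simp [scanK]
  | cons x xs ih =>
    by_cases h : x ≤ mid <;> simp [scanK, h]
    omega

-- ===== VERDICT =====
theorem mid_value_spec : Claim_equal_mid_value := by
  intro budgets mid _
  unfold Spec_mid_value mid_value mid_value_alt
  rw [mv_loop]
  set s := PySem.List.sorted budgets (fun x => x) false with hsdef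
  have hperm : s.Perm budgets := PySem.List.sorted_perm budgets (fun x => x) false
  have hpw : s.Pairwise (· ≤ ·) := PySem.List.sorted_pairwise budgets (fun x => x)
  have htake := (take_scanK s mid).trans (takeWhile_eq_filter_of_sorted s mid hpw)
  have hdrop := (drop_scanK s mid).trans (dropWhile_eq_filter_of_sorted s mid hpw)
  have hpl : (s.filter (fun x => decide (x ≤ mid))).Perm (budgets.filter (fun x => decide (x ≤ mid))) :=
    hperm.filter _
  have hpg : (s.filter (fun x => decide (¬ x ≤ mid))).Perm (budgets.filter (fun x => decide (¬ x ≤ mid))) :=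
    hperm.filter _
  have hkle : scanK s mid ≤ s.length := scanK_le s mid
  have hdl : (s.drop (scanK s mid)).length = s.length - scanK s mid := List.length_drop
  simp only [List.nil_append, List.cons.injEq, and_true]
  refine ⟨?_, ?_, ?_⟩
  · rw [foldl0_eq_sum, foldl0_eq_sum, htake, hpl.sum_eq]
  · rw [foldl0_eq_sum, foldl0_eq_sum, hdrop, hpg.sum_eq]
  · have hlen : (budgets.filter (fun x => decide (¬ x ≤ mid))).length = (s.drop (scanK s mid)).length := by
      rw [hdrop, hpg.length_eq]
    rw [hlen, hdl]
    omega
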